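-- pv_equiv track=rewrite | github.com/EnernityTwinkle/KBQA-QueryGraphSelection | ckbqa/src/rerank/build_data/select_1_n.py | selectTopBasedNegHigh
-- ===== SOURCE A (Python) =====
-- def selectTopBasedNegHigh(qid2data, N):
--     qid2dataNew = {}
--     for qid in qid2data:
--         qid2dataNew[qid] = []
--         for candPos in qid2data[qid][1]:
--             if(len(qid2data[qid][0]) > 0):
--                 qid2dataNew[qid].append(candPos)
--                 negCands = qid2data[qid][0]
--                 negNum = len(negCands)
--                 for i in range(N):
--                     qid2dataNew[qid].append(negCands[i % negNum])
--     return qid2dataNew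
-- ===== SOURCE B (Python) =====
-- def selectTopBasedNegHigh(qid2data, N):
--     out = {}
--     for qid, data in qid2data.items():
--         negCands, posCands = data[0], data[1]
--         if negCands:
--             # cyclic block of N negatives via list repetition + slicing
--             reps = -(-N // len(negCands)) if N > 0 else 0
--             block = (negCands * reps)[:N]
--             out[qid] = [x for pos in posCands for x in [pos] + block]
--         else:
--             out[qid] = []
--     return out
-- ===== Notes on version B (the rewrite author's own statement) =====
-- stated objective: simpler
-- what changed: B replaces A's triply nested per-positive appending loop (a modulo-indexed lookup for every single negative) by computing, per qid, the cyclic negative block once via list repetition and slicing (negCands * ceil(N/len) sliced to N) and then emitting each positive followed by that block with one flat comprehension.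
import Mathlib
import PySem

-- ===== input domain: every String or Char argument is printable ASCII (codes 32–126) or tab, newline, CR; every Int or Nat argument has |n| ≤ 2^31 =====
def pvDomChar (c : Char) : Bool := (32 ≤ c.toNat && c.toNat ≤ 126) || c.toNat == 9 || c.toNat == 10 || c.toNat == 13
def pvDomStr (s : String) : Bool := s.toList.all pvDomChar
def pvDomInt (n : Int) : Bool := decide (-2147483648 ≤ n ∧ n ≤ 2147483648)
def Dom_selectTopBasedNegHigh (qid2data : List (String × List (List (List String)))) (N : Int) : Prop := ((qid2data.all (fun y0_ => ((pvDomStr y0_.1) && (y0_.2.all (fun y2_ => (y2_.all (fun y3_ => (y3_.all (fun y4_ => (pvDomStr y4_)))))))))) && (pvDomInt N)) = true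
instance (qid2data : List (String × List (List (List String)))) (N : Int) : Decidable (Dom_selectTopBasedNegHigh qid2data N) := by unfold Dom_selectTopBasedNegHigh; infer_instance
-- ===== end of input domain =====

-- B builds each qid's cyclic negative block once by list repetition + slicing instead of
-- A's per-positive per-index modulo loop; objective: simpler. Return-value equivalence only
-- (neither program mutates its arguments).

-- ===== PORT A =====
-- literal transliteration of A; qid2data is a dict, so iterating its keys and looking each
-- key up yields exactly the (key, value) pairs (Pre_ requires distinct keys).
-- 'data[0]' / 'data[1]' are pyGet?; Pre_ guarantees length ≥ 2 so the '.getD []' never fires.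
def selectTopBasedNegHigh (qid2data : List (String × List (List (List String)))) (N : Int) : List (String × List (List String)) :=
  qid2data.foldl (fun acc p =>
    acc ++ [(p.1,
      ((PySem.List.pyGet? p.2 1).getD []).foldl (fun l candPos =>
        if ((PySem.List.pyGet? p.2 0).getD []).length > 0 then
          (PySem.List.pyRange 0 N 1).foldl
            (fun l2 i =>
              l2 ++ [PySem.List.pyGetD ((PySem.List.pyGet? p.2 0).getD [])
                       (PySem.Int.mod i (((PySem.List.pyGet? p.2 0).getD []).length : Int)) []])
            (l ++ [candPos])
        else l) [])]) []

-- ===== PORT B =====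
-- transliteration of Source B: 'negCands * reps' is flatten (replicate reps) (reps ≥ 0 here),
-- '[:N]' is PySem.List.slice, the flat comprehension is flatMap.
def selectTopBasedNegHigh_alt (qid2data : List (String × List (List (List String)))) (N : Int) : List (String × List (List String)) :=
  qid2data.map (fun p =>
    if ((PySem.List.pyGet? p.2 0).getD []) ≠ [] then
      (p.1,
        ((PySem.List.pyGet? p.2 1).getD []).flatMap (fun pos =>
          [pos] ++
            PySem.List.slice
              ((List.replicate
                  (if N > 0 then
                      (-(PySem.Int.floordiv (-N) (((PySem.List.pyGet? p.2 0).getD []).length : Int)))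
                    else 0).toNat
                  ((PySem.List.pyGet? p.2 0).getD [])).flatten)
              none (some N)))
    else (p.1, []))

-- ===== PRECONDITION & SPEC =====
-- Pre_ excludes (a) association lists with duplicate keys, which do not represent a Python
-- dict at all, and (b) entries whose value list has fewer than 2 elements, on which A
-- raises IndexError at qid2data[qid][1] (or [0]).
def Pre_selectTopBasedNegHigh (qid2data : List (String × List (List (List String)))) (N : Int) : Prop :=
  (qid2data.map Prod.fst).Nodup ∧ ∀ p ∈ qid2data, 2 ≤ p.2.length
instance (qid2data : List (String × List (List (List String)))) (N : Int) : Decidable (Pre_selectTopBasedNegHigh qid2data N) := by unfold Pre_selectTopBasedNegHigh; infer_instance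

def pvWitness_selectTopBasedNegHigh : (List (String × List (List (List String)))) × Int :=
  ([("q1", [[["n1"], ["n2"]], [["p1"], ["p2"]]]), ("q2", [[], [["p3"]]])], 3)

def Spec_selectTopBasedNegHigh (qid2data : List (String × List (List (List String)))) (N : Int) (out : List (String × List (List String))) : Prop := out = selectTopBasedNegHigh_alt qid2data N
instance (qid2data : List (String × List (List (List String)))) (N : Int) (out : List (String × List (List String))) : Decidable (Spec_selectTopBasedNegHigh qid2data N out) := by unfold Spec_selectTopBasedNegHigh; infer_instance

-- ===== CLAIM (what is proved, stated in full; the proofs are below) =====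
def Claim_equal_selectTopBasedNegHigh : Prop := ∀ (qid2data : List (String × List (List (List String)))) (N : Int), Dom_selectTopBasedNegHigh qid2data N → Pre_selectTopBasedNegHigh qid2data N → Spec_selectTopBasedNegHigh qid2data N (selectTopBasedNegHigh qid2data N)

-- ===== LEMMAS AND PROOFS =====

-- element i of negs repeated K times is negs[i % len]
theorem pv_flatten_replicate_getElem? {α : Type} (negs : List α) (K i : Nat)
    (h : i < K * negs.length) :
    ((List.replicate K negs).flatten)[i]? = negs[i % negs.length]? := by
  induction K generalizing i with
  | zero => omega
  | succ K ih =>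
    have hmul : (K + 1) * negs.length = K * negs.length + negs.length :=
      Nat.succ_mul K negs.length
    rw [List.replicate_succ, List.flatten_cons]
    by_cases hi : i < negs.length
    · rw [List.getElem?_append_left hi, Nat.mod_eq_of_lt hi]
    · have hi' : negs.length ≤ i := Nat.le_of_not_lt hi
      rw [List.getElem?_append_right hi', ih (i - negs.length) (by omega),
        Nat.mod_eq_sub_mod hi']

-- the cyclic block: per-index modulo map = repetition + slice
theorem pv_block_eq (negs : List (List String)) (hne : negs ≠ []) (N : Int) :
    (PySem.List.pyRange 0 N 1).map
        (fun i => PySem.List.pyGetD negs (PySem.Int.mod i (negs.length : Int)) [])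
      = PySem.List.slice
          ((List.replicate
              (if N > 0 then (-(PySem.Int.floordiv (-N) (negs.length : Int))) else 0).toNat
              negs).flatten) none (some N) := by
  have hL : 0 < negs.length := List.length_pos_iff.mpr hne
  by_cases hN : N > 0
  · -- N > 0 : reps = ceil(N / L), and N ≤ reps * L
    set q : Int := -(PySem.Int.floordiv (-N) (negs.length : Int)) with hq
    have hb := (PySem.Int.neg_floordiv_neg_eq_iff_of_pos (a := N)
      (b := (negs.length : Int)) (q := q) (by exact_mod_cast hL)).mp hq.symm
    have hNq : N ≤ q * (negs.length : Int) := hb.2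
    have hq0 : 0 < q := by nlinarith [hb.1]
    rw [if_pos hN]
    rw [PySem.List.slice_to _ (by omega : (0:Int) ≤ N)]
    rw [PySem.List.pyRange_one]
    simp only [Int.sub_zero, zero_add, List.map_map]
    have hn : N.toNat ≤ q.toNat * negs.length := by
      have : (N.toNat : Int) ≤ (q.toNat : Int) * (negs.length : Int) := by
        rw [Int.toNat_of_nonneg (by omega), Int.toNat_of_nonneg (by omega)]
        exact hNq
      exact_mod_cast this
    apply List.ext_getElem?
    intro i
    rw [List.getElem?_take]
    by_cases hi : i < N.toNat
    · rw [if_pos hi, List.getElem?_map, List.getElem?_range hi]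
      simp only [Option.map_some, Function.comp_apply]
      rw [pv_flatten_replicate_getElem? negs q.toNat i (by omega),
        PySem.Int.mod_natCast i negs.length, PySem.List.pyGetD_natCast]
      have hml : i % negs.length < negs.length := Nat.mod_lt _ hL
      rw [List.getD_eq_getElem?_getD, List.getElem?_eq_getElem hml]
      rfl
    · rw [if_neg hi, List.getElem?_map,
        List.getElem?_eq_none (by simpa using hi)]
      rfl
  · -- N ≤ 0 : both sides empty
    rw [if_neg hN, PySem.List.pyRange_one_eq_nil (by omega)]
    simp [PySem.List.slice]

-- per-qid: A's nested appending loop = B's flatMap over the precomputed block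
theorem pv_inner_eq (negs poss : List (List String)) (N : Int) :
    (poss.foldl (fun l candPos =>
        if negs.length > 0 then
          (PySem.List.pyRange 0 N 1).foldl
            (fun l2 i =>
              l2 ++ [PySem.List.pyGetD negs (PySem.Int.mod i (negs.length : Int)) []])
            (l ++ [candPos])
        else l) [])
    = (if negs ≠ [] then
        poss.flatMap (fun pos =>
          [pos] ++
            PySem.List.slice
              ((List.replicate
                  (if N > 0 then (-(PySem.Int.floordiv (-N) (negs.length : Int))) else 0).toNat
                  negs).flatten)
              none (some N))
       else []) := by
  by_cases hne : negs = []
  · subst hne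
    simp
  · rw [if_pos hne]
    have hlen : negs.length > 0 := List.length_pos_iff.mpr hne
    rw [List.foldl_ext _ (fun l candPos => l ++ ([candPos] ++
          PySem.List.slice
            ((List.replicate
                (if N > 0 then (-(PySem.Int.floordiv (-N) (negs.length : Int))) else 0).toNat
                negs).flatten) none (some N))) []
        (by
          intro l candPos _
          rw [if_pos hlen, PySem.List.foldl_append_singleton_eq_map, pv_block_eq negs hne N]
          simp)]
    rw [PySem.List.foldl_append_eq_flatMap]
    rfl

-- ===== VERDICT (by name: the statement is the Claim_ definition above) =====
theorem selectTopBasedNegHigh_spec : Claim_equal_selectTopBasedNegHigh := by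
  intro qid2data N _ _
  unfold Spec_selectTopBasedNegHigh selectTopBasedNegHigh selectTopBasedNegHigh_alt
  rw [PySem.List.foldl_append_singleton_eq_map]
  rw [List.nil_append]
  apply List.map_congr_left
  intro p _
  rw [pv_inner_eq ((PySem.List.pyGet? p.2 0).getD []) ((PySem.List.pyGet? p.2 1).getD []) N]
  by_cases hne : ((PySem.List.pyGet? p.2 0).getD []) = []
  · rw [if_neg (by simpa using hne), if_neg (by simpa using hne)]
  · rw [if_pos hne, if_pos hne]
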